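-- pv_equiv track=rewrite | github.com/unfoldingWord/tx-job-handler | tx_usfm_tools/support/contextRenderer.py | smallCapText
-- ===== SOURCE A (Python) =====
-- def smallCapText(s):
--      i = 0
--      while i < len(s):
--          if i < 50:  #we are early, look for comma
--              if s[i] == u',' or s[i] == u';' or s[i] == u'(' or s[i:i+3] == u'and':
--                  return u'{\sc ' + s[:i+1] + u'}' + s[i+1:]
--          else: # look for space
--              if s[i] == ' ':
--                  return u'{\sc ' + s[:i] + u'}' + s[i:]
--          i = i + 1
--      return u'{\sc ' + s + u'}'
-- ===== SOURCE B (Python) =====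
-- def smallCapText(s):
--     # earliest break point = minimum over the first occurrence of each delimiter
--     # (comma/semicolon/paren, and the word 'and') within the first 50 characters
--     cands = [p for p in (s.find(u',', 0, 50), s.find(u';', 0, 50),
--                          s.find(u'(', 0, 50), s.find(u'and', 0, 52)) if p != -1]
--     if cands:
--         k = min(cands)
--         return u'{\sc ' + s[:k + 1] + u'}' + s[k + 1:]
--     sp = s.find(u' ', 50)
--     if sp != -1:
--         return u'{\sc ' + s[:sp] + u'}' + s[sp:]
--     return u'{\sc ' + s + u'}'
-- ===== Notes on version B (the rewrite author's own statement) =====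
-- stated objective: faster
-- what changed: Replaces A's single positional scan (one Python-level while-loop branching per index) by four independent C-level str.find searches, one per break delimiter over its window, combined with min, falling back to a single str.find for the first space from index 50.
import Mathlib
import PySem

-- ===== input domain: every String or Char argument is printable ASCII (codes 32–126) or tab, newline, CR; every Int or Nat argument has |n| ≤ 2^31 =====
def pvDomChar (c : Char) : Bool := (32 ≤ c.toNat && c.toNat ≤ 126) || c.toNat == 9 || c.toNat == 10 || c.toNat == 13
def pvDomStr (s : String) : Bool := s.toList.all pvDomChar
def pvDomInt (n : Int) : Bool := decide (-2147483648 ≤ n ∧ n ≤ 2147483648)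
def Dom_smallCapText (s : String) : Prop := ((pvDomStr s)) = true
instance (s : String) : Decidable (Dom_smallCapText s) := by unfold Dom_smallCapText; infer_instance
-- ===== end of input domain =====

-- B replaces the per-index while-loop by four independent substring searches combined with min (measured faster: C-level str.find vs a Python-level loop).

-- ===== PORT A =====
-- Port of A's while-loop: index recursion, made structural with a fuel counter (fuel = cs.length suffices).
-- Each loop iteration: the early returns of the body become `some`, fall-through (i = i + 1) becomes `none`.
def smallCapTextGoA (cs : List Char) (i : Nat) : Nat → String
  | fuel + 1 =>
    let step : Option String :=
      if h : i < cs.length then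
        if i < 50 then
          if cs[i] = ',' ∨ cs[i] = ';' ∨ cs[i] = '(' ∨ (cs.drop i).take 3 = ['a', 'n', 'd'] then
            some ("{\\sc " ++ String.ofList (cs.take (i + 1)) ++ "}" ++ String.ofList (cs.drop (i + 1)))
          else none
        else
          if cs[i] = ' ' then
            some ("{\\sc " ++ String.ofList (cs.take i) ++ "}" ++ String.ofList (cs.drop i))
          else none
      else some ("{\\sc " ++ String.ofList cs ++ "}")
    match step with
    | some r => r
    | none => smallCapTextGoA cs (i + 1) fuel
  | 0 => "{\\sc " ++ String.ofList cs ++ "}"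

def smallCapText (s : String) : String := smallCapTextGoA s.toList 0 s.toList.length

-- ===== PORT B =====
-- port of Python str.find(needle, start, end): first index i ≥ start with needle fully inside hay
-- (hay is already the truncated window s[:end]); -1 if absent. Fuel = hay.length + 1 suffices.
def smallCapTextFind (needle hay : List Char) (i : Nat) : Nat → Int
  | fuel + 1 =>
    if i + needle.length ≤ hay.length then
      if (hay.drop i).take needle.length = needle then (i : Int)
      else smallCapTextFind needle hay (i + 1) fuel
    else -1
  | 0 => -1

-- port of s.find(' ', 50): scan from absolute index 50
def smallCapTextFindSpace (cs : List Char) (i : Nat) : Nat → Int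
  | fuel + 1 =>
    if h : i < cs.length then
      if cs[i] = ' ' then (i : Int) else smallCapTextFindSpace cs (i + 1) fuel
    else -1
  | 0 => -1

def smallCapText_alt (s : String) : String :=
  let cs := s.toList
  let w50 := cs.take 50
  let w52 := cs.take 52
  let cands := [smallCapTextFind [','] w50 0 (w50.length + 1),
                smallCapTextFind [';'] w50 0 (w50.length + 1),
                smallCapTextFind ['('] w50 0 (w50.length + 1),
                smallCapTextFind ['a', 'n', 'd'] w52 0 (w52.length + 1)].filter (· ≠ -1)
  match cands.min? with
  | some k => "{\\sc " ++ String.ofList (cs.take (k.toNat + 1)) ++ "}" ++ String.ofList (cs.drop (k.toNat + 1))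
  | none =>
    let sp := smallCapTextFindSpace cs 50 cs.length
    if sp ≠ -1 then
      "{\\sc " ++ String.ofList (cs.take sp.toNat) ++ "}" ++ String.ofList (cs.drop sp.toNat)
    else "{\\sc " ++ String.ofList cs ++ "}"

-- ===== PRECONDITION & SPEC =====
def Spec_smallCapText (s : String) (out : String) : Prop := out = smallCapText_alt s
instance (s : String) (out : String) : Decidable (Spec_smallCapText s out) := by unfold Spec_smallCapText; infer_instance

-- ===== CLAIM =====
def Claim_equal_smallCapText : Prop := ∀ (s : String), Dom_smallCapText s → Spec_smallCapText s (smallCapText s)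

-- ===== LEMMAS AND PROOFS =====
-- proof-side helper: the first index i < min(len,50) breaking A's early condition
def smallCapTextFindBreak (cs : List Char) (i : Nat) : Nat → Option Nat
  | fuel + 1 =>
    if h : i < min cs.length 50 then
      if cs[i]'(by omega) = ',' ∨ cs[i]'(by omega) = ';' ∨ cs[i]'(by omega) = '(' ∨
          (cs.drop i).take 3 = ['a', 'n', 'd'] then some i
      else smallCapTextFindBreak cs (i + 1) fuel
    else none
  | 0 => none

-- a find result is -1 or ≥ its start index
theorem find_ge (needle hay : List Char) (i fuel : Nat) :
    smallCapTextFind needle hay i fuel = -1 ∨ (i : Int) ≤ smallCapTextFind needle hay i fuel := by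
  induction fuel generalizing i with
  | zero => left; rfl
  | succ f ih =>
    rw [smallCapTextFind]
    split_ifs with h1 h2
    · right; exact le_refl _
    · rcases ih (i + 1) with h | h
      · left; exact h
      · right
        refine le_trans ?_ h
        exact_mod_cast Nat.le_succ i
    · left; rfl

-- needle no longer fits: find is -1 for every fuel
theorem find_inactive (needle hay : List Char) (i fuel : Nat)
    (h : hay.length < i + needle.length) :
    smallCapTextFind needle hay i fuel = -1 := by
  cases fuel with
  | zero => rfl
  | succ f => rw [smallCapTextFind]; simp [show ¬ i + needle.length ≤ hay.length by omega]

-- singleton slice at an in-range index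
theorem take_one_drop (cs : List Char) (i : Nat) (h : i < cs.length) :
    (cs.drop i).take 1 = [cs[i]] := by
  rw [List.drop_eq_getElem_cons h]; rfl

-- slicing through a window cs.take w: (cs.take w).drop i, take n = (cs.drop i).take n when i + n ≤ w
theorem window_slice (cs : List Char) (w i n : Nat) (h : i + n ≤ w) :
    ((cs.take w).drop i).take n = (cs.drop i).take n := by
  rw [List.drop_take, List.take_take]
  congr 1
  omega

-- find succeeds at its start index when the needle matches there
theorem find_hit (needle hay : List Char) (i fuel : Nat)
    (hact : i + needle.length ≤ hay.length)
    (hc : (hay.drop i).take needle.length = needle) :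
    smallCapTextFind needle hay i (fuel + 1) = (i : Int) := by
  rw [smallCapTextFind, if_pos hact, if_pos hc]

-- find steps past a non-matching start index
theorem find_step (needle hay : List Char) (i fuel : Nat)
    (hact : i + needle.length ≤ hay.length)
    (hc : ¬ (hay.drop i).take needle.length = needle) :
    smallCapTextFind needle hay i (fuel + 1) = smallCapTextFind needle hay (i + 1) fuel := by
  rw [smallCapTextFind, if_pos hact, if_neg hc]

-- the four window-searches, filtered and min'd, are exactly the first break point
theorem cands_break (cs : List Char) (i : Nat) (hi : i ≤ 50)
    (f1 f2 f3 f4 g : Nat)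
    (h1 : min cs.length 50 ≤ i + f1) (h2 : min cs.length 50 ≤ i + f2)
    (h3 : min cs.length 50 ≤ i + f3) (h4 : min cs.length 52 ≤ i + f4)
    (hg : min cs.length 50 ≤ i + g) :
    ([smallCapTextFind [','] (cs.take 50) i f1,
      smallCapTextFind [';'] (cs.take 50) i f2,
      smallCapTextFind ['('] (cs.take 50) i f3,
      smallCapTextFind ['a', 'n', 'd'] (cs.take 52) i f4].filter (· ≠ -1)).min?
      = (smallCapTextFindBreak cs i g).map Int.ofNat := by
  induction hn : 50 - i generalizing i f1 f2 f3 f4 g with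
  | zero =>
    have hi50 : i = 50 := by omega
    subst hi50
    have e1 := find_inactive [','] (cs.take 50) 50 f1 (by simp)
    have e2 := find_inactive [';'] (cs.take 50) 50 f2 (by simp)
    have e3 := find_inactive ['('] (cs.take 50) 50 f3 (by simp)
    have e4 := find_inactive ['a', 'n', 'd'] (cs.take 52) 50 f4 (by simp)
    have hb : smallCapTextFindBreak cs 50 g = none := by
      cases g with
      | zero => rfl
      | succ g => rw [smallCapTextFindBreak]; simp [show ¬ 50 < min cs.length 50 by omega]
    rw [e1, e2, e3, e4, hb]
    rfl
  | succ n ih =>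
    have hlt : i < 50 := by omega
    by_cases h : i < cs.length
    · -- i is inside the scanned region
      obtain ⟨f1, rfl⟩ : ∃ f', f1 = f' + 1 := ⟨f1 - 1, by omega⟩
      obtain ⟨f2, rfl⟩ : ∃ f', f2 = f' + 1 := ⟨f2 - 1, by omega⟩
      obtain ⟨f3, rfl⟩ : ∃ f', f3 = f' + 1 := ⟨f3 - 1, by omega⟩
      obtain ⟨f4, rfl⟩ : ∃ f', f4 = f' + 1 := ⟨f4 - 1, by omega⟩
      obtain ⟨g, rfl⟩ : ∃ g', g = g' + 1 := ⟨g - 1, by omega⟩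
      have hw : ∀ c : Char, i + ([c] : List Char).length ≤ (cs.take 50).length := by
        intro c; simp; omega
      have hc1 : ∀ c : Char, ((cs.take 50).drop i).take ([c] : List Char).length = [c] ↔ cs[i] = c := by
        intro c
        have : ((cs.take 50).drop i).take 1 = [cs[i]] := by
          rw [window_slice cs 50 i 1 (by omega)]; exact take_one_drop cs i h
        constructor
        · intro hx; rw [show (([c] : List Char).length = 1) from rfl, this] at hx
          exact (List.cons.injEq _ _ _ _).mp hx |>.1
        · intro hx; rw [show (([c] : List Char).length = 1) from rfl, this, hx]
      have hge : ∀ b ∈ [smallCapTextFind [','] (cs.take 50) i (f1 + 1),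
            smallCapTextFind [';'] (cs.take 50) i (f2 + 1),
            smallCapTextFind ['('] (cs.take 50) i (f3 + 1),
            smallCapTextFind ['a', 'n', 'd'] (cs.take 52) i (f4 + 1)],
          b = -1 ∨ (i : Int) ≤ b := by
        intro b hb
        simp only [List.mem_cons, List.not_mem_nil, or_false] at hb
        rcases hb with rfl | rfl | rfl | rfl
        · exact find_ge _ _ _ _
        · exact find_ge _ _ _ _
        · exact find_ge _ _ _ _
        · exact find_ge _ _ _ _
      by_cases hD : cs[i] = ',' ∨ cs[i] = ';' ∨ cs[i] = '(' ∨ (cs.drop i).take 3 = ['a', 'n', 'd']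
      · -- some delimiter matches at i: the min is i
        have hb : smallCapTextFindBreak cs i (g + 1) = some i := by
          rw [smallCapTextFindBreak]
          simp only [dif_pos (show i < min cs.length 50 by omega)]
          rw [if_pos hD]
        have hmem : (i : Int) ∈ [smallCapTextFind [','] (cs.take 50) i (f1 + 1),
            smallCapTextFind [';'] (cs.take 50) i (f2 + 1),
            smallCapTextFind ['('] (cs.take 50) i (f3 + 1),
            smallCapTextFind ['a', 'n', 'd'] (cs.take 52) i (f4 + 1)] := by
          rcases hD with hh | hh | hh | hh
          · rw [← find_hit [','] (cs.take 50) i f1 (hw ',') ((hc1 ',').mpr hh)]; simp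
          · rw [← find_hit [';'] (cs.take 50) i f2 (hw ';') ((hc1 ';').mpr hh)]; simp
          · rw [← find_hit ['('] (cs.take 50) i f3 (hw '(') ((hc1 '(').mpr hh)]; simp
          · have hlen3 : i + 3 ≤ cs.length := by
              have hl := congrArg List.length hh
              simp only [List.length_take, List.length_drop, List.length_cons,
                List.length_nil] at hl
              omega
            have hact : i + (['a', 'n', 'd'] : List Char).length ≤ (cs.take 52).length := by
              simp; omega
            have hfit : ((cs.take 52).drop i).take (['a', 'n', 'd'] : List Char).length
                = ['a', 'n', 'd'] := by
              rw [show ((['a', 'n', 'd'] : List Char).length = 3) from rfl,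
                window_slice cs 52 i 3 (by omega)]
              exact hh
            rw [← find_hit ['a', 'n', 'd'] (cs.take 52) i f4 hact hfit]; simp
        rw [hb]
        simp only [Option.map_some]
        rw [List.min?_eq_some_iff]
        refine ⟨List.mem_filter.mpr ⟨hmem, by simp⟩, ?_⟩
        intro b hb'
        rcases List.mem_filter.mp hb' with ⟨hm, hne⟩
        rcases hge b hm with hh | hh
        · exact absurd hh (by simpa using hne)
        · exact hh
      · -- nothing matches at i: every search steps to i+1
        push Not at hD
        obtain ⟨hA, hB, hC, hand⟩ := hD
        have step1 : ∀ (c : Char) (f : Nat), cs[i] ≠ c →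
            smallCapTextFind [c] (cs.take 50) i (f + 1)
              = smallCapTextFind [c] (cs.take 50) (i + 1) f := by
          intro c f hc
          exact find_step [c] (cs.take 50) i f (hw c) (fun hx => hc ((hc1 c).mp hx))
        have step4 : smallCapTextFind ['a', 'n', 'd'] (cs.take 52) i (f4 + 1)
            = smallCapTextFind ['a', 'n', 'd'] (cs.take 52) (i + 1) f4 := by
          by_cases hact : i + (['a', 'n', 'd'] : List Char).length ≤ (cs.take 52).length
          · refine find_step ['a', 'n', 'd'] (cs.take 52) i f4 hact (fun hx => hand ?_)
            rw [show ((['a', 'n', 'd'] : List Char).length = 3) from rfl,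
              window_slice cs 52 i 3 (by omega)] at hx
            exact hx
          · rw [find_inactive _ _ _ _ (by omega), find_inactive _ _ _ _ (by simp at hact ⊢; omega)]
        have hb : smallCapTextFindBreak cs i (g + 1) = smallCapTextFindBreak cs (i + 1) g := by
          rw [smallCapTextFindBreak]
          simp only [dif_pos (show i < min cs.length 50 by omega)]
          rw [if_neg (by push Not; exact ⟨hA, hB, hC, hand⟩)]
        rw [step1 ',' f1 hA, step1 ';' f2 hB, step1 '(' f3 hC, step4, hb]
        exact ih (i + 1) (by omega) f1 f2 f3 f4 g (by omega) (by omega) (by omega) (by omega)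
          (by omega) (by omega)
    · -- i ≥ cs.length (and i < 50): every search is already exhausted
      have e1 := find_inactive [','] (cs.take 50) i f1 (by simp; omega)
      have e2 := find_inactive [';'] (cs.take 50) i f2 (by simp; omega)
      have e3 := find_inactive ['('] (cs.take 50) i f3 (by simp; omega)
      have e4 := find_inactive ['a', 'n', 'd'] (cs.take 52) i f4 (by simp; omega)
      have hb : smallCapTextFindBreak cs i g = none := by
        cases g with
        | zero => rfl
        | succ g => rw [smallCapTextFindBreak]; simp [show ¬ i < min cs.length 50 by omega]
      rw [e1, e2, e3, e4, hb]
      rfl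

-- A's loop from an index ≥ 50 is exactly the phase-2 space search
theorem goA_space (cs : List Char) (i f g : Nat) (hi : 50 ≤ i) (hf : cs.length ≤ i + f)
    (hg : cs.length ≤ i + g) :
    smallCapTextGoA cs i f =
      (let sp := smallCapTextFindSpace cs i g
       if sp ≠ -1 then
         "{\\sc " ++ String.ofList (cs.take sp.toNat) ++ "}" ++ String.ofList (cs.drop sp.toNat)
       else "{\\sc " ++ String.ofList cs ++ "}") := by
  induction f generalizing i g with
  | zero =>
    cases g with
    | zero => rfl
    | succ g =>
      rw [smallCapTextGoA, smallCapTextFindSpace]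
      simp [show ¬ i < cs.length by omega]
  | succ f ih =>
    cases g with
    | zero =>
      rw [smallCapTextGoA, smallCapTextFindSpace]
      simp [show ¬ i < cs.length by omega]
    | succ g =>
      rw [smallCapTextGoA, smallCapTextFindSpace]
      by_cases h : i < cs.length
      · simp only [dif_pos h, if_neg (show ¬ i < 50 by omega)]
        by_cases hs : cs[i] = ' '
        · simp [hs]
        · simp only [hs, if_false]
          simpa using ih (i + 1) g (by omega) (by omega) (by omega)
      · simp [h]

-- A's loop from an index ≤ 50 is: first break point, then the space search from index 50
theorem goA_break (cs : List Char) (i f g : Nat) (hi : i ≤ 50) (hf : cs.length ≤ i + f)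
    (hg : min cs.length 50 ≤ i + g) :
    smallCapTextGoA cs i f =
      (match smallCapTextFindBreak cs i g with
       | some k => "{\\sc " ++ String.ofList (cs.take (k + 1)) ++ "}" ++ String.ofList (cs.drop (k + 1))
       | none =>
         let sp := smallCapTextFindSpace cs 50 cs.length
         if sp ≠ -1 then
           "{\\sc " ++ String.ofList (cs.take sp.toNat) ++ "}" ++ String.ofList (cs.drop sp.toNat)
         else "{\\sc " ++ String.ofList cs ++ "}") := by
  induction hn : 50 - i generalizing i f g with
  | zero =>
    have hi50 : i = 50 := by omega
    subst hi50
    have hb : smallCapTextFindBreak cs 50 g = none := by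
      cases g with
      | zero => rfl
      | succ g => rw [smallCapTextFindBreak]; simp [show ¬ 50 < min cs.length 50 by omega]
    rw [hb]
    exact goA_space cs 50 f cs.length le_rfl (by omega) (by omega)
  | succ n ih =>
    have hlt : i < 50 := by omega
    by_cases h : i < cs.length
    · obtain ⟨f, rfl⟩ : ∃ f', f = f' + 1 := ⟨f - 1, by omega⟩
      obtain ⟨g, rfl⟩ : ∃ g', g = g' + 1 := ⟨g - 1, by omega⟩
      rw [smallCapTextGoA, smallCapTextFindBreak]
      have hm : i < min cs.length 50 := by omega
      simp only [dif_pos h, dif_pos hm, if_pos hlt]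
      by_cases hc : cs[i] = ',' ∨ cs[i] = ';' ∨ cs[i] = '(' ∨ (cs.drop i).take 3 = ['a', 'n', 'd']
      · simp [hc]
      · simp only [if_neg hc]
        exact ih (i + 1) f g (by omega) (by omega) (by omega) (by omega)
    · have hb : smallCapTextFindBreak cs i g = none := by
        cases g with
        | zero => rfl
        | succ g => rw [smallCapTextFindBreak]; simp [show ¬ i < min cs.length 50 by omega]
      have ha : smallCapTextGoA cs i f = "{\\sc " ++ String.ofList cs ++ "}" := by
        cases f with
        | zero => rfl
        | succ f => rw [smallCapTextGoA]; simp [h]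
      have hs : smallCapTextFindSpace cs 50 cs.length = -1 := by
        cases hcs : cs.length with
        | zero => rfl
        | succ m => rw [smallCapTextFindSpace]; simp [show ¬ 50 < cs.length by omega]
      rw [hb, ha, hs]
      simp

-- ===== VERDICT =====
theorem smallCapText_spec : Claim_equal_smallCapText := by
  intro s _
  unfold Spec_smallCapText smallCapText smallCapText_alt
  simp only []
  rw [goA_break s.toList 0 s.toList.length s.toList.length (by omega) (by omega) (by omega)]
  rw [cands_break s.toList 0 (by omega) _ _ _ _ s.toList.length (by simp; omega) (by simp; omega)
      (by simp; omega) (by simp; omega) (by omega)]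
  cases smallCapTextFindBreak s.toList 0 s.toList.length with
  | none => rfl
  | some k => simp
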